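-- pv_equiv track=rewrite | github.com/Lucidare/ReplaceTTT | ReplaceTTTSolver.py | encoded_board
-- ===== SOURCE A (Python) =====
-- def encoded_board(board):
--     # Map pieces from the board key string to binary
--     piece_map = {
--         " ": "000",        # Empty cell: 000
--         "sX": "001",       # Small X
--         "mX": "010",       # Medium X
--         "lX": "011",       # Large X
--         "sO": "101",       # Small O
--         "mO": "110",       # Medium O
--         "lO": "111"        # Large O
--     }
--
--     board_binary = board
--     for piece, binary in piece_map.items():
--         board_binary = board_binary.replace(piece, binary)
--     return board_binary
-- ===== SOURCE B (Python) =====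
-- def encoded_board(board):
--     # One left-to-right scan with a piece-code lookup instead of seven sequential .replace passes.
--     piece_map = {
--         "sX": "001",
--         "mX": "010",
--         "lX": "011",
--         "sO": "101",
--         "mO": "110",
--         "lO": "111"
--     }
--     out = []
--     i = 0
--     n = len(board)
--     while i < n:
--         pair = board[i:i + 2]
--         if pair in piece_map:
--             out.append(piece_map[pair])
--             i += 2
--         elif board[i] == " ":
--             out.append("000")
--             i += 1
--         else:
--             out.append(board[i])
--             i += 1
--     return "".join(out)
-- ===== Notes on version B (the rewrite author's own statement) =====
-- stated objective: alternative
-- what changed: Replaced A's seven sequential str.replace passes over the whole string by a single left-to-right scan that looks each two-character piece up in the code table (falling back to the space/verbatim single-character cases), emitting the output in one pass.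
import Mathlib
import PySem

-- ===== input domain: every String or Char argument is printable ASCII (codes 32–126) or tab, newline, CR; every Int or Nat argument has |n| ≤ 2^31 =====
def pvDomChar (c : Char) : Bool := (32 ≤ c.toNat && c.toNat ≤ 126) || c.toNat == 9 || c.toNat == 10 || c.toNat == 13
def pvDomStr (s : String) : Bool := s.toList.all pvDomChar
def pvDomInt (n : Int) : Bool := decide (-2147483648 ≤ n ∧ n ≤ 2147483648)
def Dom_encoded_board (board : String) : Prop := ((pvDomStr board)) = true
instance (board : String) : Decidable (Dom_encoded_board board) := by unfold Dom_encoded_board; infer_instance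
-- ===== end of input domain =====

-- B replaces A's seven sequential .replace passes by one left-to-right scan with a piece-code lookup (objective: alternative single-pass decomposition).

-- ===== PORT A =====
def encoded_board (board : String) : String :=
  -- piece_map literal, insertion order as in A
  let piece_map : PySem.Dict String String :=
    ((((((PySem.Dict.empty.insert " " "000").insert "sX" "001").insert "mX" "010").insert
        "lX" "011").insert "sO" "101").insert "mO" "110").insert "lO" "111"
  -- for piece, binary in piece_map.items(): board_binary = board_binary.replace(piece, binary)
  piece_map.items.foldl (fun b pb => PySem.Str.replace b pb.1 pb.2) board

-- ===== PORT B =====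
-- pair = board[i:i+2]; if pair in piece_map: append its code (the dict lookup, as a match on the two chars)
def pvCode2 (c x : Char) : Option (List Char) :=
  if c = 's' ∧ x = 'X' then some ['0', '0', '1']
  else if c = 'm' ∧ x = 'X' then some ['0', '1', '0']
  else if c = 'l' ∧ x = 'X' then some ['0', '1', '1']
  else if c = 's' ∧ x = 'O' then some ['1', '0', '1']
  else if c = 'm' ∧ x = 'O' then some ['1', '1', '0']
  else if c = 'l' ∧ x = 'O' then some ['1', '1', '1']
  else none

-- the while loop of B: at each position append a chunk and advance by 2 or 1; join = concatenation
def pvEncAux : List Char → List Char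
  | [] => []
  | [c] => if c = ' ' then ['0', '0', '0'] else [c]
  | c :: x :: t =>
    match pvCode2 c x with
    | some code => code ++ pvEncAux t
    | none =>
      if c = ' ' then '0' :: '0' :: '0' :: pvEncAux (x :: t)
      else c :: pvEncAux (x :: t)

def encoded_board_alt (board : String) : String := String.ofList (pvEncAux board.toList)

-- ===== PRECONDITION & SPEC =====
def Spec_encoded_board (board : String) (out : String) : Prop := out = encoded_board_alt board
instance (board : String) (out : String) : Decidable (Spec_encoded_board board out) := by unfold Spec_encoded_board; infer_instance

-- ===== CLAIM (what is proved, stated in full; the proofs are below) =====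
def Claim_equal_encoded_board : Prop := ∀ (board : String), Dom_encoded_board board → Spec_encoded_board board (encoded_board board)

-- ===== LEMMAS AND PROOFS =====

-- structural form of Python str.replace for a nonempty pattern
def pvRep (old new : List Char) : List Char → List Char
  | [] => []
  | c :: t =>
    if old.isPrefixOf (c :: t) then new ++ pvRep old new (t.drop (old.length - 1))
    else c :: pvRep old new t
termination_by l => l.length
decreasing_by
  · simp
  · simp

lemma pvRep_nil (old new : List Char) : pvRep old new [] = [] := by simp [pvRep]

lemma pvRep_cons (old new : List Char) (c : Char) (t : List Char) :
    pvRep old new (c :: t) =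
      if old.isPrefixOf (c :: t) then new ++ pvRep old new (t.drop (old.length - 1))
      else c :: pvRep old new t := by
  rw [pvRep]

lemma pvGo_eq (old new : List Char) (hold : old ≠ []) :
    ∀ (fuel : Nat) (l acc : List Char), l.length ≤ fuel →
      PySem.Chars.replace.go old new fuel l acc = acc.reverse ++ pvRep old new l := by
  intro fuel
  induction fuel with
  | zero =>
    intro l acc h
    have hl : l = [] := List.length_eq_zero_iff.mp (Nat.le_zero.mp h)
    subst hl
    simp [PySem.Chars.replace.go, pvRep_nil]
  | succ n ih =>
    intro l acc h
    cases l with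
    | nil => simp [PySem.Chars.replace.go, pvRep_nil]
    | cons c t =>
      rw [PySem.Chars.replace.go, pvRep_cons]
      split
      · next hpre =>
        obtain ⟨k, hk⟩ := Nat.exists_eq_succ_of_ne_zero (fun h0 => hold (List.eq_nil_of_length_eq_zero h0))
        have hdrop : (c :: t).drop old.length = t.drop (old.length - 1) := by
          rw [hk]; simp
        rw [hdrop]
        rw [ih (t.drop (old.length - 1)) (new.reverse ++ acc)
            (by
              have hd2 : (t.drop (old.length - 1)).length = t.length - (old.length - 1) :=
                List.length_drop
              have ht : t.length ≤ n := by simpa using h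
              omega)]
        simp
      · next hpre =>
        rw [ih t (c :: acc) (by simpa using h)]
        simp

lemma pvReplace_eq (old new l : List Char) (hold : old ≠ []) :
    PySem.Chars.replace l old new = pvRep old new l := by
  rw [PySem.Chars.replace]
  simp only [List.isEmpty_iff]
  rw [if_neg hold]
  simpa using pvGo_eq old new hold l.length l [] le_rfl

-- the six piece replaces of A, applied in dict order (innermost first)
def pvChain (l : List Char) : List Char :=
  pvRep ['l', 'O'] ['1', '1', '1']
    (pvRep ['m', 'O'] ['1', '1', '0']
      (pvRep ['s', 'O'] ['1', '0', '1']
        (pvRep ['l', 'X'] ['0', '1', '1']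
          (pvRep ['m', 'X'] ['0', '1', '0']
            (pvRep ['s', 'X'] ['0', '0', '1'] l)))))

-- a tail whose head can never be the second char of a piece token
def pvSafeTail (Y : List Char) : Prop := ∀ d, Y.head? = some d → d ≠ 'X' ∧ d ≠ 'O'

lemma pvSafe_nil : pvSafeTail [] := by intro d h; simp at h

lemma pvSafe_rep (a b n0 : Char) (ns Y : List Char)
    (hn : n0 ≠ 'X' ∧ n0 ≠ 'O') (hS : pvSafeTail Y) :
    pvSafeTail (pvRep [a, b] (n0 :: ns) Y) := by
  cases Y with
  | nil => simpa [pvRep_nil] using pvSafe_nil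
  | cons c t =>
    rw [pvRep_cons]
    split
    · intro d hd
      simp only [List.cons_append, List.head?_cons, Option.some.injEq] at hd
      exact hd ▸ hn
    · intro d hd
      simp only [List.head?_cons, Option.some.injEq] at hd
      exact hd ▸ hS c rfl

lemma pvRep2_cons_of_safe (a b : Char) (hb : b = 'X' ∨ b = 'O') (new : List Char)
    (c : Char) (Y : List Char) (hS : pvSafeTail Y) :
    pvRep [a, b] new (c :: Y) = c :: pvRep [a, b] new Y := by
  rw [pvRep_cons, if_neg]
  intro hpre
  cases Y with
  | nil => simp [List.isPrefixOf] at hpre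
  | cons y t =>
    simp [List.isPrefixOf] at hpre
    rcases hS y rfl with ⟨h1, h2⟩
    rcases hb with hb | hb <;> subst hb <;> [exact h1 hpre.2.symm; exact h2 hpre.2.symm]

lemma pvRep2_cons_of_head_ne (a b : Char) (new : List Char) (c : Char) (Y : List Char)
    (h : a ≠ c) : pvRep [a, b] new (c :: Y) = c :: pvRep [a, b] new Y := by
  rw [pvRep_cons, if_neg]
  intro hpre
  cases Y with
  | nil => simp [List.isPrefixOf] at hpre
  | cons y t => simp [List.isPrefixOf] at hpre; exact h hpre.1

lemma pvChain_nil : pvChain [] = [] := by simp [pvChain, pvRep_nil]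

-- skipping a char that no token starts with
lemma pvChain_cons_left (c : Char) (Y : List Char)
    (h : c ≠ 's' ∧ c ≠ 'm' ∧ c ≠ 'l') : pvChain (c :: Y) = c :: pvChain Y := by
  unfold pvChain
  rw [pvRep2_cons_of_head_ne _ _ _ _ _ (Ne.symm h.1),
      pvRep2_cons_of_head_ne _ _ _ _ _ (Ne.symm h.2.1),
      pvRep2_cons_of_head_ne _ _ _ _ _ (Ne.symm h.2.2),
      pvRep2_cons_of_head_ne _ _ _ _ _ (Ne.symm h.1),
      pvRep2_cons_of_head_ne _ _ _ _ _ (Ne.symm h.2.1),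
      pvRep2_cons_of_head_ne _ _ _ _ _ (Ne.symm h.2.2)]

-- skipping a char whose successor can never complete a token
lemma pvChain_cons_safe (c : Char) (Y : List Char) (hS : pvSafeTail Y) :
    pvChain (c :: Y) = c :: pvChain Y := by
  unfold pvChain
  have d01 : ('0' : Char) ≠ 'X' ∧ ('0' : Char) ≠ 'O' := by decide
  have d11 : ('1' : Char) ≠ 'X' ∧ ('1' : Char) ≠ 'O' := by decide
  rw [pvRep2_cons_of_safe 's' 'X' (Or.inl rfl) _ _ _ hS]
  have hS1 := pvSafe_rep 's' 'X' '0' ['0', '1'] Y d01 hS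
  rw [pvRep2_cons_of_safe 'm' 'X' (Or.inl rfl) _ _ _ hS1]
  have hS2 := pvSafe_rep 'm' 'X' '0' ['1', '0'] _ d01 hS1
  rw [pvRep2_cons_of_safe 'l' 'X' (Or.inl rfl) _ _ _ hS2]
  have hS3 := pvSafe_rep 'l' 'X' '0' ['1', '1'] _ d01 hS2
  rw [pvRep2_cons_of_safe 's' 'O' (Or.inr rfl) _ _ _ hS3]
  have hS4 := pvSafe_rep 's' 'O' '1' ['0', '1'] _ d11 hS3
  rw [pvRep2_cons_of_safe 'm' 'O' (Or.inr rfl) _ _ _ hS4]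
  have hS5 := pvSafe_rep 'm' 'O' '1' ['1', '0'] _ d11 hS4
  rw [pvRep2_cons_of_safe 'l' 'O' (Or.inr rfl) _ _ _ hS5]

lemma pvChain_tok (c x : Char) (code Z : List Char) (h : pvCode2 c x = some code) :
    pvChain (c :: x :: Z) = code ++ pvChain Z := by
  unfold pvCode2 at h
  split_ifs at h with h1 h2 h3 h4 h5 h6 <;>
    first
    | (obtain ⟨hc, hx⟩ := h1; subst hc; subst hx; cases h;
       simp [pvChain, pvRep_cons, List.isPrefixOf])
    | (obtain ⟨hc, hx⟩ := h2; subst hc; subst hx; cases h;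
       simp [pvChain, pvRep_cons, List.isPrefixOf])
    | (obtain ⟨hc, hx⟩ := h3; subst hc; subst hx; cases h;
       simp [pvChain, pvRep_cons, List.isPrefixOf])
    | (obtain ⟨hc, hx⟩ := h4; subst hc; subst hx; cases h;
       simp [pvChain, pvRep_cons, List.isPrefixOf])
    | (obtain ⟨hc, hx⟩ := h5; subst hc; subst hx; cases h;
       simp [pvChain, pvRep_cons, List.isPrefixOf])
    | (obtain ⟨hc, hx⟩ := h6; subst hc; subst hx; cases h;
       simp [pvChain, pvRep_cons, List.isPrefixOf])

lemma pvRep_space_cons_ne (c : Char) (t : List Char) (hc : c ≠ ' ') :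
    pvRep [' '] ['0', '0', '0'] (c :: t) = c :: pvRep [' '] ['0', '0', '0'] t := by
  rw [pvRep_cons, if_neg]
  simp [List.isPrefixOf]
  exact fun h => hc h.symm

lemma pvRep_space_cons_sp (t : List Char) :
    pvRep [' '] ['0', '0', '0'] (' ' :: t) = '0' :: '0' :: '0' :: pvRep [' '] ['0', '0', '0'] t := by
  rw [pvRep_cons, if_pos] <;> simp [List.isPrefixOf]

-- main lemma: the six-replace chain after the space replace equals B's scan
lemma pvMain : ∀ (n : Nat) (l : List Char), l.length ≤ n →
    pvChain (pvRep [' '] ['0', '0', '0'] l) = pvEncAux l := by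
  intro n
  induction n with
  | zero =>
    intro l h
    have : l = [] := List.length_eq_zero_iff.mp (Nat.le_zero.mp h)
    subst this
    simp [pvRep_nil, pvChain_nil, pvEncAux]
  | succ n ih =>
    intro l h
    cases l with
    | nil => simp [pvRep_nil, pvChain_nil, pvEncAux]
    | cons c t =>
      by_cases hc : c = ' '
      · subst hc
        rw [pvRep_space_cons_sp]
        have d0 : ('0' : Char) ≠ 's' ∧ ('0' : Char) ≠ 'm' ∧ ('0' : Char) ≠ 'l' := by decide
        rw [pvChain_cons_left _ _ d0, pvChain_cons_left _ _ d0, pvChain_cons_left _ _ d0,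
            ih t (by simpa using h)]
        cases t with
        | nil => simp [pvEncAux]
        | cons x t' =>
          have : pvCode2 ' ' x = none := by simp [pvCode2]
          simp [pvEncAux, this]
      · rw [pvRep_space_cons_ne _ _ hc]
        cases t with
        | nil =>
          rw [pvRep_nil, pvChain_cons_safe _ _ pvSafe_nil, pvChain_nil]
          simp [pvEncAux, hc]
        | cons x t' =>
          match hcode : pvCode2 c x with
          | some code =>
            have hx : x ≠ ' ' := by
              intro hx; subst hx
              simp [pvCode2] at hcode
            rw [pvRep_space_cons_ne _ _ hx, pvChain_tok c x code _ hcode,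
                ih t' (by simp at h; omega)]
            simp [pvEncAux, hcode]
          | none =>
            have hstep : pvChain (c :: pvRep [' '] ['0', '0', '0'] (x :: t')) =
                c :: pvChain (pvRep [' '] ['0', '0', '0'] (x :: t')) := by
              by_cases hcl : c ≠ 's' ∧ c ≠ 'm' ∧ c ≠ 'l'
              · exact pvChain_cons_left _ _ hcl
              · -- c is a token head, so x is not 'X'/'O' (else pvCode2 would match)
                have hc3 : c = 's' ∨ c = 'm' ∨ c = 'l' := by
                  by_contra hcon; push Not at hcon; exact hcl hcon
                have hxXO : x ≠ 'X' ∧ x ≠ 'O' := by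
                  constructor <;> intro hx <;> subst hx <;>
                    rcases hc3 with h | h | h <;> subst h <;> simp [pvCode2] at hcode
                apply pvChain_cons_safe
                by_cases hx : x = ' '
                · subst hx
                  rw [pvRep_space_cons_sp]
                  intro d hd; simp at hd; subst hd; decide
                · rw [pvRep_space_cons_ne _ _ hx]
                  intro d hd; simp at hd; subst hd; exact hxXO
            rw [hstep, ih (x :: t') (by simpa using h)]
            simp [pvEncAux, hcode, hc]

lemma pvA_toList (b : String) :
    (encoded_board b).toList = pvChain (pvRep [' '] ['0', '0', '0'] b.toList) := by
  show (PySem.Str.replace (PySem.Str.replace (PySem.Str.replace (PySem.Str.replace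
        (PySem.Str.replace (PySem.Str.replace (PySem.Str.replace b " " "000")
        "sX" "001") "mX" "010") "lX" "011") "sO" "101") "mO" "110") "lO" "111").toList =
      pvChain (pvRep [' '] ['0', '0', '0'] b.toList)
  simp only [PySem.Str.toList_replace]
  simp only [show (" ".toList = [' ']) from rfl, show ("000".toList = ['0', '0', '0']) from rfl,
    show ("sX".toList = ['s', 'X']) from rfl, show ("001".toList = ['0', '0', '1']) from rfl,
    show ("mX".toList = ['m', 'X']) from rfl, show ("010".toList = ['0', '1', '0']) from rfl,
    show ("lX".toList = ['l', 'X']) from rfl, show ("011".toList = ['0', '1', '1']) from rfl,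
    show ("sO".toList = ['s', 'O']) from rfl, show ("101".toList = ['1', '0', '1']) from rfl,
    show ("mO".toList = ['m', 'O']) from rfl, show ("110".toList = ['1', '1', '0']) from rfl,
    show ("lO".toList = ['l', 'O']) from rfl, show ("111".toList = ['1', '1', '1']) from rfl]
  unfold pvChain
  rw [pvReplace_eq _ _ _ (by decide), pvReplace_eq _ _ _ (by decide),
      pvReplace_eq _ _ _ (by decide), pvReplace_eq _ _ _ (by decide),
      pvReplace_eq _ _ _ (by decide), pvReplace_eq _ _ _ (by decide),
      pvReplace_eq _ _ _ (by decide)]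

-- ===== VERDICT (by name: the statement is the Claim_ definition above) =====
theorem encoded_board_spec : Claim_equal_encoded_board := by
  intro board _
  unfold Spec_encoded_board encoded_board_alt
  apply String.toList_injective
  rw [pvA_toList, pvMain board.toList.length board.toList le_rfl]
  simp
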